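-- pv_equiv track=rewrite | github.com/AtomicLeap/Data-Strutures-and-Algorithms | Algorithms/Graphs/largest_component.py | _dfr_helper
-- ===== SOURCE A (Python) =====
-- def _dfr_helper(graph: dict[str, list[str]], current: str, visited: dict[str, int]) -> int:
--     if current in visited:
--         return 0
--
--     count = 1
--     visited[current] = 1
--
--     for neighbour in graph[current]:
--         count += _dfr_helper(graph, neighbour, visited)
--     return count
-- ===== SOURCE B (Python) =====
-- def _dfr_helper(graph: dict[str, list[str]], current: str, visited: dict[str, int]) -> int:
--     count = 0
--     stack = [current]
--     while stack:
--         node = stack.pop()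
--         if node in visited:
--             continue
--         visited[node] = 1
--         count += 1
--         stack.extend(reversed(graph[node]))
--     return count
-- ===== Notes on version B (the rewrite author's own statement) =====
-- stated objective: alternative
-- what changed: A's recursive DFS is replaced by an iterative DFS over an explicit stack that marks nodes visited at pop time (pushing reversed neighbour lists to keep A's traversal order), removing Python recursion entirely.
-- outside the precondition, e.g. on _dfr_helper({'a': [], 'b': ['c']}, 'a', {}): A returns 1, B returns 1; on _dfr_helper({'a': ['x']}, 'a', {}): A raises KeyError, B raises KeyError
import Mathlib
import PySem

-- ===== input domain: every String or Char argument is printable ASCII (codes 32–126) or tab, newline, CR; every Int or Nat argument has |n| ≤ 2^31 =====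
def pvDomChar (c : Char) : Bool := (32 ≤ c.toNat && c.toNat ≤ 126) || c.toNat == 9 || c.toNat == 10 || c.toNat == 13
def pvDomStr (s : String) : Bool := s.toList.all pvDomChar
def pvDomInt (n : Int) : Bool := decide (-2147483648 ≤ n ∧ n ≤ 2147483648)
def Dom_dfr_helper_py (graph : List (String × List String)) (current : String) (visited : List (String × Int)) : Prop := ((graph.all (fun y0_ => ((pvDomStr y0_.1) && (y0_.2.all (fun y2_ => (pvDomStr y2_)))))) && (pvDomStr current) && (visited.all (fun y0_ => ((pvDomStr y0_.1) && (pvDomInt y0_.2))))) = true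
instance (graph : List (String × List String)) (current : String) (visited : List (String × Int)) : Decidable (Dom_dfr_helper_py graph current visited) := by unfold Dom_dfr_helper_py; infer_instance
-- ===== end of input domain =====

-- B replaces A's recursive DFS by an iterative DFS over an explicit stack (marking visited at
-- pop time); both mutate `visited` in Python identically — the equivalence proved here is about
-- the RETURN value.

-- ===== PORT A =====
-- A's recursion is not structurally terminating, so the port carries a Nat fuel as a pure
-- totality guard (none = fuel exhausted or Python's KeyError); the top-level fuel
-- graph.length + 1 is proved sufficient on Pre_ inputs.  The for-loop over the neighbours is
-- the structural recursion dfrListA.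
mutual
def dfrA (g : PySem.Dict String (List String)) : Nat → String → PySem.Dict String Int → Option (Int × PySem.Dict String Int)
  | 0, _, _ => none
  | f + 1, cur, v =>
    if v.contains cur then some (0, v)                       -- `if current in visited: return 0`
    else
      match g.get? cur with
      | none => none                                         -- `graph[current]` raises KeyError
      | some ns =>                                           -- count = 1; visited[current] = 1
        (dfrListA g f ns (v.insert cur 1)).map (fun r => (1 + r.1, r.2))
  termination_by f _ _ => (f, 0)
def dfrListA (g : PySem.Dict String (List String)) : Nat → List String → PySem.Dict String Int → Option (Int × PySem.Dict String Int)
  | _, [], v => some (0, v)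
  | f, n :: ns, v => do                                      -- `for neighbour in graph[current]: count += …`
    let r1 ← dfrA g f n v
    let r2 ← dfrListA g f ns r1.2
    pure (r1.1 + r2.1, r2.2)
  termination_by f ns _ => (f, ns.length + 1)
end

def dfr_helper_py (graph : List (String × List String)) (current : String) (visited : List (String × Int)) : Int :=
  ((dfrA ⟨graph⟩ (graph.length + 1) current ⟨visited⟩).map Prod.fst).getD 0

-- ===== PORT B =====
-- Potential used only as the (sufficient) fuel bound of the while-loop guard.
def stackPot (g : PySem.Dict String (List String)) (v : PySem.Dict String Int) : Nat :=
  ∑ k ∈ (g.items.map Prod.fst).toFinset.filter (fun k => v.contains k = false),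
    (1 + ((g.get? k).getD []).length)

-- Iterative DFS; the stack's head is its top (Python pops from the end and extends with
-- reversed(graph[node]), which in head-top representation is `ns ++ st`).  Fuel is a totality
-- guard for the while loop (none = fuel exhausted or KeyError).
def loopB (g : PySem.Dict String (List String)) : Nat → List String → PySem.Dict String Int → Int → Option Int
  | 0, _, _, _ => none
  | _ + 1, [], _, c => some c                                -- `while stack:` exits
  | f + 1, n :: st, v, c =>
    if v.contains n then loopB g f st v c                    -- `if node in visited: continue`
    else
      match g.get? n with
      | none => none                                         -- `graph[node]` raises KeyError
      | some ns => loopB g f (ns ++ st) (v.insert n 1) (c + 1)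

def dfr_helper_py_alt (graph : List (String × List String)) (current : String) (visited : List (String × Int)) : Int :=
  (loopB ⟨graph⟩ (stackPot ⟨graph⟩ ⟨visited⟩ + 2) [current] ⟨visited⟩ 0).getD 0

-- ===== PRECONDITION & SPEC =====
-- Python A raises KeyError when the DFS reaches an unvisited node that is not a key of graph;
-- Pre_ excludes those inputs conservatively, by requiring current to be visited, or current to
-- be a key and EVERY neighbour in the graph to be a key or initially visited — this also
-- excludes some inputs whose missing neighbours are unreachable, on which A still returns.
def Pre_dfr_helper_py (graph : List (String × List String)) (current : String) (visited : List (String × Int)) : Prop :=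
  (PySem.Dict.contains (⟨visited⟩ : PySem.Dict String Int) current = true) ∨
  ((PySem.Dict.get? (⟨graph⟩ : PySem.Dict String (List String)) current).isSome = true ∧
   ∀ p ∈ graph, ∀ m ∈ p.2,
     (PySem.Dict.get? (⟨graph⟩ : PySem.Dict String (List String)) m).isSome = true ∨
     PySem.Dict.contains (⟨visited⟩ : PySem.Dict String Int) m = true)
instance (graph : List (String × List String)) (current : String) (visited : List (String × Int)) : Decidable (Pre_dfr_helper_py graph current visited) := by unfold Pre_dfr_helper_py; infer_instance

def pvWitness_dfr_helper_py : (List (String × List String)) × String × (List (String × Int)) :=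
  ([("a", ["b", "c"]), ("b", ["a"]), ("c", [])], "a", [("d", 1)])

def Spec_dfr_helper_py (graph : List (String × List String)) (current : String) (visited : List (String × Int)) (out : Int) : Prop := out = dfr_helper_py_alt graph current visited
instance (graph : List (String × List String)) (current : String) (visited : List (String × Int)) (out : Int) : Decidable (Spec_dfr_helper_py graph current visited out) := by unfold Spec_dfr_helper_py; infer_instance

-- ===== CLAIM (what is proved, stated in full; the proofs are below) =====
def Claim_equal_dfr_helper_py : Prop := ∀ (graph : List (String × List String)) (current : String) (visited : List (String × Int)), Dom_dfr_helper_py graph current visited → Pre_dfr_helper_py graph current visited → Spec_dfr_helper_py graph current visited (dfr_helper_py graph current visited)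

-- ===== LEMMAS AND PROOFS =====

-- `visited` only grows
def VMono (v v' : PySem.Dict String Int) : Prop :=
  ∀ x, v.contains x = true → v'.contains x = true

-- the global neighbour condition of Pre_, stated over the Dict
def GInv (g : PySem.Dict String (List String)) (v : PySem.Dict String Int) : Prop :=
  ∀ p ∈ g.items, ∀ m ∈ p.2, (g.get? m).isSome = true ∨ v.contains m = true

-- number of unvisited graph keys (termination measure of A's recursion)
def unvis (g : PySem.Dict String (List String)) (v : PySem.Dict String Int) : Nat :=
  ((g.items.map Prod.fst).toFinset.filter (fun k => v.contains k = false)).card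

theorem vmono_refl (v : PySem.Dict String Int) : VMono v v := fun _ h => h

theorem vmono_trans {v1 v2 v3 : PySem.Dict String Int} (h1 : VMono v1 v2) (h2 : VMono v2 v3) : VMono v1 v3 :=
  fun x h => h2 x (h1 x h)

theorem vmono_insert (v : PySem.Dict String Int) (k : String) (n : Int) : VMono v (v.insert k n) := by
  intro x h
  rw [PySem.Dict.contains_insert]
  simp [h]

theorem ginv_mono {g : PySem.Dict String (List String)} {v v' : PySem.Dict String Int}
    (hm : VMono v v') (h : GInv g v) : GInv g v' := by
  intro p hp m hmem
  rcases h p hp m hmem with h1 | h1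
  · exact Or.inl h1
  · exact Or.inr (hm m h1)

theorem mem_keysFinset_of_isSome {g : PySem.Dict String (List String)} {k : String}
    (h : (g.get? k).isSome = true) : k ∈ (g.items.map Prod.fst).toFinset := by
  rcases Option.isSome_iff_exists.mp h with ⟨ns, hns⟩
  have := PySem.Dict.mem_items_of_get?_eq_some _ hns
  simp only [List.mem_toFinset, List.mem_map]
  exact ⟨(k, ns), this, rfl⟩

theorem filter_insert_eq_erase (g : PySem.Dict String (List String)) (v : PySem.Dict String Int)
    (k : String) (n : Int) :
    (g.items.map Prod.fst).toFinset.filter (fun x => (v.insert k n).contains x = false)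
      = ((g.items.map Prod.fst).toFinset.filter (fun x => v.contains x = false)).erase k := by
  ext x
  simp only [Finset.mem_filter, Finset.mem_erase, PySem.Dict.contains_insert]
  constructor
  · rintro ⟨hx, hc⟩
    simp only [Bool.or_eq_false_iff, beq_eq_false_iff_ne] at hc
    exact ⟨hc.1, hx, hc.2⟩
  · rintro ⟨hne, hx, hc⟩
    refine ⟨hx, ?_⟩
    simp [hc, hne]

theorem unvis_antitone {g : PySem.Dict String (List String)} {v v' : PySem.Dict String Int}
    (hm : VMono v v') : unvis g v' ≤ unvis g v := by
  apply Finset.card_le_card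
  intro x hx
  simp only [Finset.mem_filter] at hx ⊢
  refine ⟨hx.1, ?_⟩
  cases h : v.contains x with
  | false => rfl
  | true => exact absurd (hm x h) (by simp [hx.2])

theorem unvis_insert_lt {g : PySem.Dict String (List String)} {v : PySem.Dict String Int}
    {k : String} (hk : (g.get? k).isSome = true) (hv : v.contains k = false) (n : Int) :
    unvis g (v.insert k n) < unvis g v := by
  unfold unvis
  rw [filter_insert_eq_erase]
  apply Finset.card_erase_lt_of_mem
  simp only [Finset.mem_filter]
  exact ⟨mem_keysFinset_of_isSome hk, hv⟩

theorem unvis_le_length (graph : List (String × List String)) (v : PySem.Dict String Int) :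
    unvis ⟨graph⟩ v ≤ graph.length := by
  unfold unvis
  refine le_trans (Finset.card_filter_le _ _) (le_trans (List.toFinset_card_le _) ?_)
  simp

-- completeness of A's fueled port: with Pre_'s conditions and fuel > unvis, it returns some,
-- and visited only grows
theorem compA (g : PySem.Dict String (List String)) : ∀ f : Nat,
    (∀ cur v, GInv g v → (v.contains cur = true ∨ (g.get? cur).isSome = true) → unvis g v < f →
      ∃ c v', dfrA g f cur v = some (c, v') ∧ VMono v v') ∧
    (∀ ns v, GInv g v → (∀ n ∈ ns, v.contains n = true ∨ (g.get? n).isSome = true) → unvis g v < f →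
      ∃ c v', dfrListA g f ns v = some (c, v') ∧ VMono v v') := by
  intro f
  induction f with
  | zero => exact ⟨fun _ _ _ _ h => absurd h (by omega), fun _ _ _ _ h => absurd h (by omega)⟩
  | succ f ih =>
    have hsingle : ∀ cur v, GInv g v → (v.contains cur = true ∨ (g.get? cur).isSome = true) →
        unvis g v < f + 1 → ∃ c v', dfrA g (f + 1) cur v = some (c, v') ∧ VMono v v' := by
      intro cur v hInv hcur hu
      by_cases hc : v.contains cur = true
      · exact ⟨0, v, by simp [dfrA, hc], vmono_refl v⟩
      · have hcb : v.contains cur = false := by simpa using hc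
        have hkey : (g.get? cur).isSome = true := by
          rcases hcur with h | h
          · exact absurd h hc
          · exact h
        rcases Option.isSome_iff_exists.mp hkey with ⟨ns, hns⟩
        have hmemi : (cur, ns) ∈ g.items := PySem.Dict.mem_items_of_get?_eq_some _ hns
        have hm1 : VMono v (v.insert cur 1) := vmono_insert v cur 1
        have hlt : unvis g (v.insert cur 1) < f := by
          have h1 : unvis g (v.insert cur 1) < unvis g v :=
            unvis_insert_lt (by simp [hns]) hcb 1
          omega
        rcases ih.2 ns (v.insert cur 1) (ginv_mono hm1 hInv)
            (fun n hn => (hInv (cur, ns) hmemi n hn).elim (fun h => Or.inr h) (fun h => Or.inl (hm1 n h)))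
            hlt with ⟨c, v', hsome, hmono⟩
        refine ⟨1 + c, v', ?_, vmono_trans hm1 hmono⟩
        simp [dfrA, hcb, hns, hsome]
    refine ⟨hsingle, ?_⟩
    intro ns
    induction ns with
    | nil => exact fun v _ _ _ => ⟨0, v, by simp [dfrListA], vmono_refl v⟩
    | cons n ns ihns =>
      intro v hInv hns hu
      rcases hsingle n v hInv (hns n (by simp)) hu with ⟨c1, v1, h1, hm1⟩
      rcases ihns v1 (ginv_mono hm1 hInv)
          (fun m hm => (hns m (by simp [hm])).elim (fun h => Or.inl (hm1 m h)) Or.inr)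
          (lt_of_le_of_lt (unvis_antitone hm1) hu) with ⟨c2, v2, h2, hm2⟩
      exact ⟨c1 + c2, v2, by simp [dfrListA, h1, h2], vmono_trans hm1 hm2⟩

-- fuel monotonicity of B's loop
theorem monoB (g : PySem.Dict String (List String)) : ∀ f f' : Nat, f ≤ f' →
    ∀ stack v c r, loopB g f stack v c = some r → loopB g f' stack v c = some r := by
  intro f
  induction f with
  | zero => intro f' _ stack v c r h; simp [loopB] at h
  | succ f ih =>
    intro f' hle stack v c r h
    obtain ⟨f'', rfl⟩ : ∃ f'', f' = f'' + 1 := ⟨f' - 1, by omega⟩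
    cases stack with
    | nil => simpa [loopB] using h
    | cons n st =>
      simp only [loopB] at h ⊢
      by_cases hc : v.contains n = true
      · simp only [hc, if_true] at h ⊢
        exact ih f'' (by omega) _ _ _ _ h
      · have hcb : v.contains n = false := by simpa using hc
        simp only [hcb] at h ⊢
        cases hg : g.get? n with
        | none => simp [hg] at h
        | some ns =>
          simp only [hg] at h ⊢
          exact ih f'' (by omega) _ _ _ _ h

theorem stackPot_insert {g : PySem.Dict String (List String)} {v : PySem.Dict String Int}
    {n : String} {ns : List String} (hns : g.get? n = some ns) (hv : v.contains n = false) :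
    stackPot g (v.insert n 1) + (1 + ns.length) = stackPot g v := by
  unfold stackPot
  rw [filter_insert_eq_erase]
  have hmem : n ∈ (g.items.map Prod.fst).toFinset.filter (fun k => v.contains k = false) := by
    simp only [Finset.mem_filter]
    exact ⟨mem_keysFinset_of_isSome (by simp [hns]), hv⟩
  have hsum := Finset.sum_erase_add ((g.items.map Prod.fst).toFinset.filter (fun k => v.contains k = false))
    (fun k => (1 + ((g.get? k).getD []).length)) hmem
  simpa [hns] using hsum

-- completeness of B's fueled loop: with the stack's nodes keys-or-visited and fuel exceeding
-- the potential, it returns some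
theorem compB (g : PySem.Dict String (List String)) : ∀ f : Nat, ∀ stack v c,
    GInv g v → (∀ n ∈ stack, v.contains n = true ∨ (g.get? n).isSome = true) →
    stack.length + stackPot g v < f → ∃ r, loopB g f stack v c = some r := by
  intro f
  induction f with
  | zero => intro stack v c _ _ h; omega
  | succ f ih =>
    intro stack v c hInv hst hpot
    cases stack with
    | nil => exact ⟨c, rfl⟩
    | cons n st =>
      by_cases hc : v.contains n = true
      · rcases ih st v c hInv (fun m hm => hst m (by simp [hm]))
            (by simp at hpot ⊢; omega) with ⟨r, hr⟩
        exact ⟨r, by simp [loopB, hc, hr]⟩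
      · have hcb : v.contains n = false := by simpa using hc
        have hkey : (g.get? n).isSome = true := by
          rcases hst n (by simp) with h | h
          · exact absurd h hc
          · exact h
        rcases Option.isSome_iff_exists.mp hkey with ⟨ns, hns⟩
        have hmemi : (n, ns) ∈ g.items := PySem.Dict.mem_items_of_get?_eq_some _ hns
        have hm1 : VMono v (v.insert n 1) := vmono_insert v n 1
        have hpot' : (ns ++ st).length + stackPot g (v.insert n 1) < f := by
          have := stackPot_insert hns hcb
          simp only [List.length_append, List.length_cons] at hpot ⊢
          omega
        rcases ih (ns ++ st) (v.insert n 1) (c + 1) (ginv_mono hm1 hInv)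
            (fun m hm => by
              rcases List.mem_append.mp hm with h | h
              · exact (hInv (n, ns) hmemi m h).elim Or.inr (fun hh => Or.inl (hm1 m hh))
              · exact (hst m (by simp [h])).elim (fun hh => Or.inl (hm1 m hh)) Or.inr)
            hpot' with ⟨r, hr⟩
        exact ⟨r, by simp [loopB, hcb, hns, hr]⟩

-- the simulation: processing A's recursion tree equals running B's stack loop
theorem simAB (g : PySem.Dict String (List String)) : ∀ f : Nat,
    (∀ cur v c1 v1 fb rest c r, dfrA g f cur v = some (c1, v1) →
      loopB g fb rest v1 (c + c1) = some r → ∃ h, loopB g h (cur :: rest) v c = some r) ∧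
    (∀ ns v c1 v1 fb rest c r, dfrListA g f ns v = some (c1, v1) →
      loopB g fb rest v1 (c + c1) = some r → ∃ h, loopB g h (ns ++ rest) v c = some r) := by
  intro f
  induction f with
  | zero =>
    constructor
    · intro cur v c1 v1 fb rest c r h; simp [dfrA] at h
    · intro ns v c1 v1 fb rest c r h hl
      cases ns with
      | nil =>
        simp only [dfrListA, Option.some.injEq, Prod.mk.injEq] at h
        refine ⟨fb, ?_⟩
        simp only [List.nil_append]
        rw [← h.1, ← h.2] at hl
        simpa using hl
      | cons n ns => simp [dfrListA, dfrA] at h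
  | succ f ih =>
    have hsingle : ∀ cur v c1 v1 fb rest c r, dfrA g (f + 1) cur v = some (c1, v1) →
        loopB g fb rest v1 (c + c1) = some r → ∃ h, loopB g h (cur :: rest) v c = some r := by
      intro cur v c1 v1 fb rest c r h hl
      by_cases hc : v.contains cur = true
      · simp only [dfrA, hc, if_true, Option.some.injEq, Prod.mk.injEq] at h
        refine ⟨fb + 1, ?_⟩
        rw [← h.1, ← h.2] at hl
        simp only [loopB, hc, if_true]
        simpa using hl
      · have hcb : v.contains cur = false := by simpa using hc
        simp only [dfrA, hcb, Bool.false_eq_true, if_false] at h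
        cases hg : g.get? cur with
        | none => simp [hg] at h
        | some ns =>
          simp only [hg, Option.map_eq_some_iff] at h
          rcases h with ⟨⟨cs, v2⟩, hlist, heq⟩
          simp only [Prod.mk.injEq] at heq
          have : loopB g fb rest v2 ((c + 1) + cs) = some r := by
            rw [← heq.2] at hl
            have : c + c1 = c + 1 + cs := by rw [← heq.1]; ring
            rwa [this] at hl
          rcases ih.2 ns (v.insert cur 1) cs v2 fb rest (c + 1) r hlist this with ⟨h1, hh1⟩
          refine ⟨h1 + 1, ?_⟩
          simp [loopB, hcb, hg, hh1]
    refine ⟨hsingle, ?_⟩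
    intro ns
    induction ns with
    | nil =>
      intro v c1 v1 fb rest c r h hl
      simp only [dfrListA, Option.some.injEq, Prod.mk.injEq] at h
      refine ⟨fb, ?_⟩
      simp only [List.nil_append]
      rw [← h.1, ← h.2] at hl
      simpa using hl
    | cons n ns ihns =>
      intro v c1 v1 fb rest c r h hl
      simp only [dfrListA, Option.bind_eq_bind, Option.bind_eq_some_iff] at h
      rcases h with ⟨⟨ca, va⟩, ha, h⟩
      rcases h with ⟨⟨cb, vb⟩, hb, heq⟩
      simp only [Option.pure_def, Option.some.injEq, Prod.mk.injEq] at heq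
      have hl' : loopB g fb rest vb ((c + ca) + cb) = some r := by
        rw [← heq.2] at hl
        have : c + c1 = c + ca + cb := by rw [← heq.1]; ring
        rwa [this] at hl
      rcases ihns va cb vb fb rest (c + ca) r hb hl' with ⟨h2, hh2⟩
      rcases hsingle n v ca va h2 (ns ++ rest) c r ha hh2 with ⟨h3, hh3⟩
      exact ⟨h3, by simpa using hh3⟩

-- ===== VERDICT (by name: the statement is the Claim_ definition above) =====
theorem dfr_helper_py_spec : Claim_equal_dfr_helper_py := by
  intro graph current visited _ hpre
  unfold Spec_dfr_helper_py dfr_helper_py dfr_helper_py_alt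
  set g : PySem.Dict String (List String) := ⟨graph⟩ with hg
  set v : PySem.Dict String Int := ⟨visited⟩ with hv
  by_cases hc : v.contains current = true
  · -- current already visited: both return 0 directly
    have hA : dfrA g (graph.length + 1) current v = some (0, v) := by simp [dfrA, hc]
    have hB : loopB g (stackPot g v + 2) [current] v 0 = some 0 := by
      have : stackPot g v + 2 = (stackPot g v + 1) + 1 := by omega
      rw [this]
      simp [loopB, hc]
    rw [hA, hB]
    rfl
  · have hkey : (g.get? current).isSome = true := by
      rcases hpre with h | h
      · exact absurd h hc
      · exact h.1
    have hInv : GInv g v := by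
      rcases hpre with h | h
      · exact absurd h hc
      · intro p hp m hm
        exact h.2 p hp m hm
    have hu : unvis g v < graph.length + 1 := by
      have := unvis_le_length graph v
      rw [← hg] at this
      omega
    rcases (compA g (graph.length + 1)).1 current v hInv (Or.inr hkey) hu with ⟨c1, v1, hA, _⟩
    -- simulate A's run on B's loop
    have hend : loopB g 1 [] v1 (0 + c1) = some c1 := by simp [loopB]
    rcases (simAB g (graph.length + 1)).1 current v c1 v1 1 [] 0 c1 hA hend with ⟨h1, hh1⟩
    -- B's own fuel also suffices
    rcases compB g (stackPot g v + 2) [current] v 0 hInv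
        (fun m hm => by simp at hm; subst hm; exact Or.inr hkey)
        (by simp; omega) with ⟨c2, hB⟩
    have e1 := monoB g h1 (max h1 (stackPot g v + 2)) (le_max_left _ _) _ _ _ _ hh1
    have e2 := monoB g (stackPot g v + 2) (max h1 (stackPot g v + 2)) (le_max_right _ _) _ _ _ _ hB
    rw [e1] at e2
    rw [hA, hB]
    simp only [Option.map_some, Option.getD_some]
    exact Option.some.inj e2
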